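-- pv_equiv track=rewrite | github.com/TJHoolahan-01/Hurricanes_Challenge | Analysis.py | damaged_area_count
-- ===== SOURCE A (Python) =====
-- def damaged_area_count(hurricanes):
--   damaged_area_count = {}
--
--   for hurricane in hurricanes:
--     for area in hurricanes[hurricane]["Areas Affected"]:
--       if area in damaged_area_count:
--
--         damaged_area_count[area] += 1
--       else:
--         damaged_area_count[area] = 1
--   return damaged_area_count
-- ===== SOURCE B (Python) =====
-- def damaged_area_count(hurricanes):
--   all_areas = []
--   for data in hurricanes.values():
--     all_areas.extend(data["Areas Affected"])
--   return {area: all_areas.count(area) for area in dict.fromkeys(all_areas)}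
-- ===== Notes on version B (the rewrite author's own statement) =====
-- stated objective: alternative
-- what changed: B flattens every hurricane's affected areas into one list and then builds the result by rescanning that list once per distinct area (dict comprehension over dict.fromkeys + list.count), instead of A's single pass that increments a running counter dict.
import Mathlib
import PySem

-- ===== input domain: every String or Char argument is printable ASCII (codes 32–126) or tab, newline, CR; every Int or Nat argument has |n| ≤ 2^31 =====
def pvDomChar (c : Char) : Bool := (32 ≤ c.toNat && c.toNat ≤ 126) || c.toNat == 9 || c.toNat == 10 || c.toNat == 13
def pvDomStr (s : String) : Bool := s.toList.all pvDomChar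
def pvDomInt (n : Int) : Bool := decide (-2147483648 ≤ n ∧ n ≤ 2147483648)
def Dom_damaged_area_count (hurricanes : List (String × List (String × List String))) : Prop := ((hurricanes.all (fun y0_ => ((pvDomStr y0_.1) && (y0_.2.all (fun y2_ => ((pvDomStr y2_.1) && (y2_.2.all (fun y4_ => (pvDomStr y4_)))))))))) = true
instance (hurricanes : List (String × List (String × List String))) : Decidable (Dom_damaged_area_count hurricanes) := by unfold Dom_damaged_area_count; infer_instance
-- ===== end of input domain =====

-- B builds the counts by flattening all areas into one list and rescanning it once per
-- distinct area, instead of A's single accumulating counter pass (alternative decomposition).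

-- ===== PORT A =====
-- A: one pass over the dict, incrementing a counter dict per area (if-present +=1 else =1).
def damaged_area_count (hurricanes : List (String × List (String × List String))) : List (String × Int) :=
  ((PySem.Dict.ofList hurricanes).items.foldl
    (fun acc item =>
      ((PySem.Dict.ofList item.2).getD "Areas Affected" []).foldl
        (fun acc area =>
          if acc.contains area then acc.insert area (acc.getD area 0 + 1)
          else acc.insert area 1)
        acc)
    (PySem.Dict.empty : PySem.Dict String Int)).items

-- ===== PORT B =====
-- B: flatten all areas, then {area: all.count(area) for area in dict.fromkeys(all)}.
def damaged_area_count_alt (hurricanes : List (String × List (String × List String))) : List (String × Int) :=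
  let all_areas := (PySem.Dict.ofList hurricanes).values.foldl
    (fun acc data => acc ++ (PySem.Dict.ofList data).getD "Areas Affected" []) []
  (PySem.List.dedup all_areas).map (fun area => (area, (PySem.List.count all_areas area : Int)))

-- ===== PRECONDITION & SPEC =====
-- Pre_ excludes exactly the inputs where some hurricane's dict lacks the key
-- "Areas Affected": there Python A raises KeyError (and B raises the same).
def Pre_damaged_area_count (hurricanes : List (String × List (String × List String))) : Prop :=
  ∀ p ∈ (PySem.Dict.ofList hurricanes).items,
    (PySem.Dict.ofList p.2).contains "Areas Affected" = true
instance (hurricanes : List (String × List (String × List String))) : Decidable (Pre_damaged_area_count hurricanes) := by unfold Pre_damaged_area_count; infer_instance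

def pvWitness_damaged_area_count : (List (String × List (String × List String))) :=
  [("Andrew", [("Areas Affected", ["Florida", "Louisiana"])]),
   ("Katrina", [("Areas Affected", ["Louisiana"])])]

def Spec_damaged_area_count (hurricanes : List (String × List (String × List String))) (out : List (String × Int)) : Prop := out = damaged_area_count_alt hurricanes
instance (hurricanes : List (String × List (String × List String))) (out : List (String × Int)) : Decidable (Spec_damaged_area_count hurricanes out) := by unfold Spec_damaged_area_count; infer_instance

-- ===== CLAIM (what is proved, stated in full; the proofs are below) =====
def Claim_equal_damaged_area_count : Prop := ∀ (hurricanes : List (String × List (String × List String))), Dom_damaged_area_count hurricanes → Pre_damaged_area_count hurricanes → Spec_damaged_area_count hurricanes (damaged_area_count hurricanes)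

-- ===== LEMMAS AND PROOFS =====

-- A's if-branches are both an insert; they collapse to the unconditional counting step.
theorem count_step_eq (acc : PySem.Dict String Int) (area : String) :
    (if acc.contains area then acc.insert area (acc.getD area 0 + 1)
     else acc.insert area 1) = acc.insert area (acc.getD area 0 + 1) := by
  cases h : acc.contains area with
  | true => simp
  | false => simp [PySem.Dict.getD_of_not_contains _ _ h]

-- A's nested loop is the flat loop over the concatenation of the inner lists.
theorem foldl_foldl_eq_foldl_flatMap {α β γ : Type} (g : α → List β) (f : γ → β → γ)
    (l : List α) (init : γ) :
    l.foldl (fun acc x => (g x).foldl f acc) init = (l.flatMap g).foldl f init := by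
  induction l generalizing init with
  | nil => rfl
  | cons x xs ih => simp [List.foldl_append, ih]

-- ===== VERDICT (by name: the statement is the Claim_ definition above) =====

theorem damaged_area_count_spec : Claim_equal_damaged_area_count := by
  intro hurricanes _ _
  unfold Spec_damaged_area_count damaged_area_count damaged_area_count_alt
  have hstep : (fun (acc : PySem.Dict String Int) (area : String) =>
      if acc.contains area then acc.insert area (acc.getD area 0 + 1)
      else acc.insert area 1) =
      (fun acc area => acc.insert area (acc.getD area 0 + 1)) := by
    funext acc area; exact count_step_eq acc area
  rw [hstep,
    foldl_foldl_eq_foldl_flatMap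
      (fun item : String × List (String × List String) => (PySem.Dict.ofList item.2).getD "Areas Affected" [])
      (fun (acc : PySem.Dict String Int) (area : String) => acc.insert area (acc.getD area 0 + 1))
      (PySem.Dict.ofList hurricanes).items PySem.Dict.empty,
    PySem.Dict.foldl_insert_getD_add_one_eq_counter, PySem.Dict.items_counter,
    PySem.List.foldl_append_eq_flatMap]
  simp [PySem.Dict.values, List.flatMap_map, PySem.List.count]
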